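-- pv_equiv track=rewrite | github.com/a-tsagkalidis/swappr | fsearch.py | calculate_house_matching_score
-- ===== SOURCE A (Python) =====
-- def calculate_house_matching_score(result, CRITERIA_RANGES):
--     '''
--     Returns a matching score regarding house characteristics. The
--     function recieves as arguments one submission from the search results
--     and the user's primary submission. It then compares the house
--     characteristics based on square_meters, rental, bedrooms, and
--     bathrooms to increase or not the house matching score accordingly.
--     '''
--     # Declare a score variable for house matching
--     house_matching_score = 0
--
--     for criteria, ranges in CRITERIA_RANGES.items():
--         if ranges['min'] <= result[criteria] <= ranges['max']:
--             house_matching_score += 5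
--         else:
--             house_matching_score -= 5
--
--     return house_matching_score
-- ===== SOURCE B (Python) =====
-- def calculate_house_matching_score(result, CRITERIA_RANGES):
--     '''
--     Divide-and-conquer scoring: the total score is the sum of independent
--     per-criterion contributions (+5 in range, -5 otherwise), so we score
--     the two halves of the criteria list recursively and add them.
--     '''
--     items = list(CRITERIA_RANGES.items())
--
--     def score(lo, hi):
--         if hi - lo == 0:
--             return 0
--         if hi - lo == 1:
--             criteria, ranges = items[lo]
--             return 5 if ranges['min'] <= result[criteria] <= ranges['max'] else -5
--         mid = (lo + hi) // 2
--         return score(lo, mid) + score(mid, hi)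
--
--     return score(0, len(items))
-- ===== Notes on version B (the rewrite author's own statement) =====
-- stated objective: alternative
-- what changed: Replaces A's single left-to-right +5/-5 accumulator loop with a divide-and-conquer recursion that scores the two halves of the criteria list independently and adds the results (valid because each criterion's contribution is independent).
import Mathlib
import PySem

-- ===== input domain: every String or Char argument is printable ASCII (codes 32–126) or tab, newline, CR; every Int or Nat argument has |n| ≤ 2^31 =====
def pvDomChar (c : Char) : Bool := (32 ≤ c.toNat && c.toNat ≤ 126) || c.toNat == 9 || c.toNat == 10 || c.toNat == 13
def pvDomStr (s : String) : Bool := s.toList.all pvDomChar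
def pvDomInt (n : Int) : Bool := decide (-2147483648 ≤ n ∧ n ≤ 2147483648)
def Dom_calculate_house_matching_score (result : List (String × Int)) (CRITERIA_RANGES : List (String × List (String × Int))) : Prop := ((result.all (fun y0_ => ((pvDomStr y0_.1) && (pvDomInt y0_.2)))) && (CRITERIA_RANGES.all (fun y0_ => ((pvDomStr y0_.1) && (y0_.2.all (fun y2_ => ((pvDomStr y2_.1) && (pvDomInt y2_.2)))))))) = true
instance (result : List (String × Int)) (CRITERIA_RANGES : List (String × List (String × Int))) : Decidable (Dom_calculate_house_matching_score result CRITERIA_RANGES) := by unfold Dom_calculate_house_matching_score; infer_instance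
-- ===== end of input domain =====

-- B replaces A's left-to-right +5/-5 accumulator loop by a divide-and-conquer recursion
-- over index ranges of the criteria list (alternative decomposition, same O(n) cost).

-- ===== PORT A =====
-- dict lookup = first match in the association list; Pre_ guarantees the looked-up keys exist,
-- so the `.getD 0` defaults (standing for Python's KeyError) are never taken inside Pre_.
-- The nested if mirrors Python's short-circuit: ranges['max'] is only read when min <= x.
def calculate_house_matching_score (result : List (String × Int)) (CRITERIA_RANGES : List (String × List (String × Int))) : Int :=
  CRITERIA_RANGES.foldl (fun house_matching_score p =>
    let mn := (List.lookup "min" p.2).getD 0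
    let x := (List.lookup p.1 result).getD 0
    if mn ≤ x then
      if x ≤ (List.lookup "max" p.2).getD 0 then house_matching_score + 5
      else house_matching_score - 5
    else house_matching_score - 5) 0

-- ===== PORT B =====
-- the leaf contribution of one (criteria, ranges) item; same short-circuit order as Python's
-- chained comparison (min lookup, result lookup, then max only if the first comparison holds)
def chms_delta (result : List (String × Int)) (p : String × List (String × Int)) : Int :=
  let mn := (List.lookup "min" p.2).getD 0
  let x := (List.lookup p.1 result).getD 0
  if mn ≤ x then
    if x ≤ (List.lookup "max" p.2).getD 0 then 5 else -5
  else -5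

-- the inner `score(lo, hi)` divide-and-conquer recursion over the half-open index range;
-- `fuel` is only a structural totality guard (each call halves hi-lo, so fuel = length suffices
-- and the 0-fuel branch is never reached on the actual call)
def chms_score (result : List (String × Int)) (items : List (String × List (String × Int))) : Nat → Nat → Nat → Int
  | 0, _, _ => 0
  | fuel + 1, lo, hi =>
    if hi - lo = 0 then 0
    else if hi - lo = 1 then chms_delta result ((items[lo]?).getD ("", []))
    else
      let mid := (lo + hi) / 2
      chms_score result items fuel lo mid + chms_score result items fuel mid hi

def calculate_house_matching_score_alt (result : List (String × Int)) (CRITERIA_RANGES : List (String × List (String × Int))) : Int :=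
  chms_score result CRITERIA_RANGES CRITERIA_RANGES.length 0 CRITERIA_RANGES.length

-- ===== PRECONDITION & SPEC =====
-- Pre_ excludes exactly the inputs where Python A raises KeyError: a criterion missing from
-- result, a ranges dict without 'min', or (when the first comparison succeeds) without 'max'.
def Pre_calculate_house_matching_score (result : List (String × Int)) (CRITERIA_RANGES : List (String × List (String × Int))) : Prop :=
  ∀ p ∈ CRITERIA_RANGES,
    (List.lookup "min" p.2).isSome = true ∧
    (List.lookup p.1 result).isSome = true ∧
    ((List.lookup "min" p.2).getD 0 ≤ (List.lookup p.1 result).getD 0 →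
      (List.lookup "max" p.2).isSome = true)
instance (result : List (String × Int)) (CRITERIA_RANGES : List (String × List (String × Int))) : Decidable (Pre_calculate_house_matching_score result CRITERIA_RANGES) := by unfold Pre_calculate_house_matching_score; infer_instance

def pvWitness_calculate_house_matching_score : (List (String × Int)) × (List (String × List (String × Int))) :=
  ([("rental", 500), ("bedrooms", 2)],
   [("rental", [("min", 400), ("max", 600)]), ("bedrooms", [("min", 3), ("max", 4)])])

def Spec_calculate_house_matching_score (result : List (String × Int)) (CRITERIA_RANGES : List (String × List (String × Int))) (out : Int) : Prop := out = calculate_house_matching_score_alt result CRITERIA_RANGES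
instance (result : List (String × Int)) (CRITERIA_RANGES : List (String × List (String × Int))) (out : Int) : Decidable (Spec_calculate_house_matching_score result CRITERIA_RANGES out) := by unfold Spec_calculate_house_matching_score; infer_instance

-- ===== CLAIM (what is proved, stated in full; the proofs are below) =====
def Claim_equal_calculate_house_matching_score : Prop := ∀ (result : List (String × Int)) (CRITERIA_RANGES : List (String × List (String × Int))), Dom_calculate_house_matching_score result CRITERIA_RANGES → Pre_calculate_house_matching_score result CRITERIA_RANGES → Spec_calculate_house_matching_score result CRITERIA_RANGES (calculate_house_matching_score result CRITERIA_RANGES)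

-- ===== LEMMAS AND PROOFS =====
-- A's fold is the sum of the per-item deltas
lemma chms_foldl_eq (result : List (String × Int)) :
    ∀ (l : List (String × List (String × Int))) (s : Int),
      l.foldl (fun house_matching_score p =>
        let mn := (List.lookup "min" p.2).getD 0
        let x := (List.lookup p.1 result).getD 0
        if mn ≤ x then
          if x ≤ (List.lookup "max" p.2).getD 0 then house_matching_score + 5
          else house_matching_score - 5
        else house_matching_score - 5) s
      = s + (l.map (chms_delta result)).sum := by
  intro l
  induction l with
  | nil => intro s; simp
  | cons p t ih =>
    intro s
    simp only [List.foldl_cons, List.map_cons, List.sum_cons, ih, chms_delta]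
    split_ifs <;> ring

-- B's divide-and-conquer equals the sum of deltas over the slice items[lo:hi]
-- (for any fuel at least hi - lo)
lemma chms_score_eq (result : List (String × Int)) (items : List (String × List (String × Int))) :
    ∀ (fuel lo hi : Nat), hi - lo ≤ fuel → hi ≤ items.length →
      chms_score result items fuel lo hi
        = (((items.drop lo).take (hi - lo)).map (chms_delta result)).sum := by
  intro fuel
  induction fuel with
  | zero =>
    intro lo hi hn _
    have h0 : hi - lo = 0 := by omega
    simp [chms_score, h0]
  | succ fuel ih =>
    intro lo hi hn hhi
    rw [chms_score]
    by_cases h0 : hi - lo = 0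
    · simp [h0]
    · by_cases h1 : hi - lo = 1
      · have hlo : lo < items.length := by omega
        rw [if_neg h0, if_pos h1, h1, List.drop_eq_getElem_cons hlo, List.take_succ_cons,
          List.take_zero, List.map_cons, List.map_nil, List.sum_cons, List.sum_nil,
          List.getElem?_eq_getElem hlo]
        simp
      · have h2 : 2 ≤ hi - lo := by omega
        rw [if_neg h0, if_neg h1]
        show chms_score result items fuel lo ((lo + hi) / 2) + chms_score result items fuel ((lo + hi) / 2) hi = _
        rw [ih lo _ (by omega) (by omega), ih _ hi (by omega) hhi]
        have hdd : (items.drop lo).drop ((lo + hi) / 2 - lo) = items.drop ((lo + hi) / 2) := by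
          rw [List.drop_drop]; congr 1; omega
        have hsplit : hi - lo = ((lo + hi) / 2 - lo) + (hi - (lo + hi) / 2) := by omega
        rw [hsplit, List.take_add, List.map_append, List.sum_append, hdd]

-- ===== VERDICT (by name: the statement is the Claim_ definition above) =====
theorem calculate_house_matching_score_spec : Claim_equal_calculate_house_matching_score := by
  intro result CR _ _
  show _ = _
  rw [calculate_house_matching_score, calculate_house_matching_score_alt,
    chms_foldl_eq result CR 0,
    chms_score_eq result CR CR.length 0 CR.length (by omega) (le_refl _)]
  simp
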